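-- pv_equiv track=rewrite | github.com/confirmxxx/Swanlake | swanlake/commands/beacon/sweep.py | _aggregate_local_status
-- ===== SOURCE A (Python) =====
-- def _aggregate_local_status(per_path: list[str]) -> str:
--     """Combine per-path classifications into a per-surface status."""
--     if not per_path:
--         return "unbeaconed"
--     if "beaconed" in per_path:
--         return "beaconed"
--     if "partial" in per_path:
--         return "partial"
--     if all(s == "missing" for s in per_path):
--         return "missing"
--     return "unbeaconed"
-- ===== SOURCE B (Python) =====
-- def _aggregate_local_status(per_path: list[str]) -> str:
--     """Combine per-path classifications into a per-surface status (single pass)."""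
--     if not per_path:
--         return "unbeaconed"
--     has_beaconed = has_partial = has_non_missing = False
--     for s in per_path:
--         if s == "beaconed":
--             has_beaconed = True
--         if s == "partial":
--             has_partial = True
--         if s != "missing":
--             has_non_missing = True
--     if has_beaconed:
--         return "beaconed"
--     if has_partial:
--         return "partial"
--     if not has_non_missing:
--         return "missing"
--     return "unbeaconed"
-- ===== Notes on version B (the rewrite author's own statement) =====
-- stated objective: alternative
-- what changed: Replaced A's four separate scans (two membership tests, an all()) by a single pass accumulating three boolean flags, with the verdict decided once after the loop.
import Mathlib
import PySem

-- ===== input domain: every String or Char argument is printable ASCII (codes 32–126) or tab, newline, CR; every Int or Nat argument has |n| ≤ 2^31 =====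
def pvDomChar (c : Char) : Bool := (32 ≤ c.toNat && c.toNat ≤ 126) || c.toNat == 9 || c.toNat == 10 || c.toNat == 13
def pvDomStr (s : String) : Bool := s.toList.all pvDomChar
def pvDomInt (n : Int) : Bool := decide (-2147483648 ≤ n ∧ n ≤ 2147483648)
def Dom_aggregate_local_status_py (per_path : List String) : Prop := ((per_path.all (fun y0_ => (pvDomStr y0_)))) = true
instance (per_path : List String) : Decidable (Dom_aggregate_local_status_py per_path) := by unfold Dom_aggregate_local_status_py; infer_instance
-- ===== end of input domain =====

-- Header: B makes one pass accumulating three booleans instead of A's four separate scans; same result, proved equal.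

-- ===== PORT A =====
def aggregate_local_status_py (per_path : List String) : String :=
  if per_path = [] then "unbeaconed"
  else if per_path.contains "beaconed" then "beaconed"
  else if per_path.contains "partial" then "partial"
  else if per_path.all (fun s => s == "missing") then "missing"
  else "unbeaconed"

-- ===== PORT B =====
-- single-pass flag fold: (has_beaconed, has_partial, has_non_missing)
def aggregate_local_status_py_alt (per_path : List String) : String :=
  if per_path = [] then "unbeaconed"
  else
    let flags := per_path.foldl
      (fun (acc : Bool × Bool × Bool) s =>
        (acc.1 || s == "beaconed", acc.2.1 || s == "partial", acc.2.2 || s != "missing"))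
      (false, false, false)
    if flags.1 then "beaconed"
    else if flags.2.1 then "partial"
    else if !flags.2.2 then "missing"
    else "unbeaconed"

-- ===== PRECONDITION & SPEC =====
def Spec_aggregate_local_status_py (per_path : List String) (out : String) : Prop := out = aggregate_local_status_py_alt per_path
instance (per_path : List String) (out : String) : Decidable (Spec_aggregate_local_status_py per_path out) := by unfold Spec_aggregate_local_status_py; infer_instance

-- ===== CLAIM (what is proved, stated in full; the proofs are below) =====
def Claim_equal_aggregate_local_status_py : Prop := ∀ (per_path : List String), Dom_aggregate_local_status_py per_path → Spec_aggregate_local_status_py per_path (aggregate_local_status_py per_path)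

-- ===== LEMMAS AND PROOFS =====

-- the flag fold computes the three membership facts
theorem flags_eq (l : List String) (b p n : Bool) :
    l.foldl (fun (acc : Bool × Bool × Bool) s =>
        (acc.1 || s == "beaconed", acc.2.1 || s == "partial", acc.2.2 || s != "missing"))
      (b, p, n)
    = (b || l.contains "beaconed", p || l.contains "partial",
       n || !(l.all (fun s => s == "missing"))) := by
  induction l generalizing b p n with
  | nil => simp
  | cons h t ih =>
    simp only [List.foldl_cons, ih, List.contains_cons, List.all_cons]
    refine Prod.ext ?_ (Prod.ext ?_ ?_) <;>
      cases h' : (h == "missing") <;>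
        simp_all [Bool.or_comm, Bool.or_assoc, Bool.or_left_comm, BEq.comm]

-- ===== VERDICT (by name: the statement is the Claim_ definition above) =====
theorem aggregate_local_status_py_spec : Claim_equal_aggregate_local_status_py := by
  intro per_path _
  unfold Spec_aggregate_local_status_py aggregate_local_status_py aggregate_local_status_py_alt
  by_cases hE : per_path = []
  · simp [hE]
  · simp only [hE, if_neg hE, flags_eq, Bool.false_or]
    by_cases hb : per_path.contains "beaconed" <;>
      by_cases hp : per_path.contains "partial" <;>
        by_cases hm : per_path.all (fun s => s == "missing") <;>
          simp [hb, hp, hm]
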